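-- pv_equiv track=rewrite | github.com/WCBru/Loose-Scripts | Small Challenges/Daily Programmer/20180611_IE.py | check
-- ===== SOURCE A (Python) =====
-- def check(word):
--     for letter in range(len(word)):
--         if word[letter] == 'e':
--             if letter > 1:
--                 if word[letter-1] == 'i' and word[letter-2] == 'c':
--                     return False
--
--             if letter < len(word) - 1:
--                 if word[letter+1] == 'i' and (word[letter-1] != 'c' or letter == 0):
--                     return False
--     return True
-- ===== SOURCE B (Python) =====
-- def check(word):
--     if "cie" in word:
--         return False
--     i = word.find("ei")
--     while i != -1:
--         if i == 0 or word[i - 1] != 'c':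
--             return False
--         i = word.find("ei", i + 2)
--     return True
-- ===== Notes on version B (the rewrite author's own statement) =====
-- stated objective: faster
-- what changed: Replaces A's per-index Python loop with neighbour lookups around every 'e' by a substring-search algorithm: reject if 'cie' occurs anywhere, otherwise use str.find to jump directly between the 'ei' occurrences and require each to be preceded by 'c'.
import Mathlib
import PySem

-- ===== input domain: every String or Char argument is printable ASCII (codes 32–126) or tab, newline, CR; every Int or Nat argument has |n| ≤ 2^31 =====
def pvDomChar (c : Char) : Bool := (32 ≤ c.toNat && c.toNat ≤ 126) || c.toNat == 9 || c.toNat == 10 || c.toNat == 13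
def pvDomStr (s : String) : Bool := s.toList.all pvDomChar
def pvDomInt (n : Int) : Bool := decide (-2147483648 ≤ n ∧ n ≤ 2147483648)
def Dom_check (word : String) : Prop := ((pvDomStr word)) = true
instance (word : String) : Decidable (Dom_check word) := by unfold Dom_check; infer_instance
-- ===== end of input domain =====

-- B replaces A's per-index scan (with its four neighbour lookups per 'e') by a substring-search
-- algorithm: reject if "cie" occurs, otherwise jump between the "ei" occurrences with str.find
-- and demand each is preceded by 'c' (same O(n); measured constant-factor faster in Python).

-- ===== PORT A =====
-- for letter in range(len(word)): … early return False → structural recursion over the index list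
def checkLoopA (word : String) : List Int → Bool
  | [] => true
  | letter :: rest =>
    if PySem.Str.pyGet? word letter == some 'e' then
      if decide (letter > 1) &&
         (PySem.Str.pyGet? word (letter - 1) == some 'i' &&
          PySem.Str.pyGet? word (letter - 2) == some 'c') then
        false
      else if decide (letter < PySem.Str.len word - 1) &&
              (PySem.Str.pyGet? word (letter + 1) == some 'i' &&
               (!(PySem.Str.pyGet? word (letter - 1) == some 'c') || letter == 0)) then
        false
      else checkLoopA word rest
    else checkLoopA word rest

def check (word : String) : Bool :=
  checkLoopA word (PySem.List.pyRange 0 (PySem.Str.len word) 1)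

-- ===== PORT B =====
-- the while loop over i = word.find("ei", …); fuel (length + 1) only makes the loop total:
-- each iteration moves i forward by at least 2, so the fuel is never exhausted
def checkFindLoop (word : String) : Nat → Int → Bool
  | 0, _ => true
  | fuel + 1, i =>
    if i = -1 then true
    else if i == 0 || !(PySem.Str.pyGet? word (i - 1) == some 'c') then false
    else checkFindLoop word fuel (PySem.Str.findFrom word "ei" (i + 2) none)

def check_alt (word : String) : Bool :=
  if PySem.Str.isIn "cie" word then false
  else checkFindLoop word ((PySem.Str.len word).toNat + 1) (PySem.Str.find word "ei")

-- ===== PRECONDITION & SPEC =====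
def Spec_check (word : String) (out : Bool) : Prop := out = check_alt word
instance (word : String) (out : Bool) : Decidable (Spec_check word out) := by unfold Spec_check; infer_instance

-- ===== CLAIM (what is proved, stated in full; the proofs are below) =====
def Claim_equal_check : Prop := ∀ (word : String), Dom_check word → Spec_check word (check word)

-- ===== LEMMAS AND PROOFS =====

-- the condition A's loop body tests at index i (Int index, as in the port)
def HitAInt (word : String) (i : Int) : Prop :=
  PySem.Str.pyGet? word i = some 'e' ∧
    ((1 < i ∧ PySem.Str.pyGet? word (i - 1) = some 'i' ∧ PySem.Str.pyGet? word (i - 2) = some 'c') ∨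
     (i < PySem.Str.len word - 1 ∧ PySem.Str.pyGet? word (i + 1) = some 'i' ∧
       (PySem.Str.pyGet? word (i - 1) ≠ some 'c' ∨ i = 0)))

-- the same condition over the character list with a natural index
def HitA (cs : List Char) (j : Nat) : Prop :=
  (2 ≤ j ∧ cs[j]? = some 'e' ∧ cs[j-1]? = some 'i' ∧ cs[j-2]? = some 'c')
  ∨ (cs[j]? = some 'e' ∧ cs[j+1]? = some 'i' ∧ (j = 0 ∨ cs[j-1]? ≠ some 'c'))

-- "ei" occurs at position j
def EiAt (cs : List Char) (j : Nat) : Prop := cs[j]? = some 'e' ∧ cs[j+1]? = some 'i'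

-- every "ei" occurrence at a position ≥ k is preceded by 'c'
def EiGood (cs : List Char) (k : Nat) : Prop :=
  ∀ j, k ≤ j → EiAt cs j → (0 < j ∧ cs[j-1]? = some 'c')

lemma loopA_char (word : String) (idxs : List Int) :
    checkLoopA word idxs = true ↔ ∀ i ∈ idxs, ¬ HitAInt word i := by
  induction idxs with
  | nil => simp [checkLoopA]
  | cons i rest ih =>
    simp only [checkLoopA, List.mem_cons, forall_eq_or_imp]
    split_ifs with h1 h2 h3 <;> simp_all [HitAInt]

lemma hitA_ge (cs : List Char) (j : Nat) (h : cs.length ≤ j) : ¬ HitA cs j := by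
  have : cs[j]? = none := by simp [List.getElem?_eq_none h]
  simp [HitA, this]

lemma hitAInt_eq (word : String) (j : Nat) :
    HitAInt word (j : Int) ↔ HitA word.toList j := by
  have e1 : 1 ≤ j → PySem.Str.pyGet? word ((j : Int) - 1) = word.toList[j-1]? := by
    intro h
    have e : (j : Int) - 1 = ((j - 1 : Nat) : Int) := by omega
    rw [e, PySem.Str.pyGet?_natCast]
  have e2 : 2 ≤ j → PySem.Str.pyGet? word ((j : Int) - 2) = word.toList[j-2]? := by
    intro h
    have e : (j : Int) - 2 = ((j - 2 : Nat) : Int) := by omega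
    rw [e, PySem.Str.pyGet?_natCast]
  have e3 : PySem.Str.pyGet? word ((j : Int) + 1) = word.toList[j+1]? := by
    have e : (j : Int) + 1 = ((j + 1 : Nat) : Int) := by push_cast; ring
    rw [e, PySem.Str.pyGet?_natCast]
  have hb : ∀ {c : Char} {m : Nat}, word.toList[m]? = some c → m < word.toList.length :=
    fun h => (List.getElem?_eq_some_iff.mp h).1
  simp only [HitAInt, HitA, PySem.Str.len_eq, PySem.Str.pyGet?_natCast, e3]
  constructor
  · rintro ⟨he, ⟨h1, hi, hc⟩ | ⟨hlt, hi, hp⟩⟩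
    · have h2 : 2 ≤ j := by omega
      rw [e1 (by omega)] at hi
      rw [e2 h2] at hc
      exact Or.inl ⟨h2, he, hi, hc⟩
    · refine Or.inr ⟨he, hi, ?_⟩
      by_cases hj : j = 0
      · exact Or.inl hj
      · rcases hp with hne | h0
        · rw [e1 (by omega)] at hne
          exact Or.inr hne
        · omega
  · rintro (⟨h2, he, hi, hc⟩ | ⟨he, hi, hp⟩)
    · refine ⟨he, Or.inl ⟨by omega, ?_, ?_⟩⟩
      · rw [e1 (by omega)]; exact hi
      · rw [e2 h2]; exact hc
    · refine ⟨he, Or.inr ⟨by have := hb hi; omega, hi, ?_⟩⟩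
      by_cases hj : j = 0
      · exact Or.inr (by omega)
      · rcases hp with h0 | hne
        · omega
        · refine Or.inl ?_
          rw [e1 (by omega)]
          exact hne

lemma check_char (word : String) :
    check word = true ↔ ∀ j, ¬ HitA word.toList j := by
  rw [check, loopA_char]
  constructor
  · intro h j
    by_cases hj : j < word.toList.length
    · rw [← hitAInt_eq]
      refine h _ (PySem.List.mem_pyRange_one.mpr ⟨by omega, ?_⟩)
      rw [PySem.Str.len_eq]
      omega
    · exact hitA_ge _ _ (by omega)
  · intro h i hi
    obtain ⟨h0, hlt⟩ := PySem.List.mem_pyRange_one.mp hi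
    obtain ⟨j, rfl⟩ : ∃ j : Nat, i = (j : Int) := ⟨i.toNat, by omega⟩
    rw [hitAInt_eq]
    exact h j

-- two- and three-character prefixes, read off by indexing
lemma prefix_pair {a b : Char} {t : List Char} :
    [a, b] <+: t ↔ t[0]? = some a ∧ t[1]? = some b := by
  match t with
  | [] => simp
  | [x] => simp [List.cons_prefix_cons]
  | x :: y :: t' => simp [List.cons_prefix_cons, eq_comm]

lemma prefix_triple {a b c : Char} {t : List Char} :
    [a, b, c] <+: t ↔ t[0]? = some a ∧ t[1]? = some b ∧ t[2]? = some c := by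
  match t with
  | [] => simp
  | [x] => simp [List.cons_prefix_cons]
  | [x, y] => simp [List.cons_prefix_cons, eq_comm]
  | x :: y :: z :: t' => simp [List.cons_prefix_cons, eq_comm]

lemma eiAt_iff_prefix (cs : List Char) (j : Nat) :
    EiAt cs j ↔ ['e', 'i'] <+: cs.drop j := by
  rw [prefix_pair]
  simp [EiAt, List.getElem?_drop]

lemma ei_no_overlap (cs : List Char) (j : Nat) (h : EiAt cs j) : ¬ EiAt cs (j + 1) := by
  rintro ⟨he, -⟩
  have := h.2
  simp_all

-- characterization of the find-driven while loop, by induction on the fuel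
lemma loopB_char (word : String) (fuel k : Nat) (hk : k ≤ word.toList.length)
    (hf : word.toList.length + 1 - k ≤ fuel) :
    checkFindLoop word fuel (PySem.Str.findFrom word "ei" (k : Int) none) = true ↔
      EiGood word.toList k := by
  induction fuel generalizing k with
  | zero => omega
  | succ fuel ih =>
    have hfe : PySem.Str.findFrom word "ei" (k : Int) none =
        PySem.Chars.findFrom word.toList "ei".toList (k : Int) none := by
      simp
    by_cases hnone : PySem.Chars.findFrom word.toList "ei".toList (k : Int) none = -1
    · -- no further occurrence: loop returns true, EiGood holds vacuously
      have hno : ¬ (['e', 'i'] <:+: word.toList.drop k) := by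
        have := (PySem.Chars.findFrom_natCast_eq_neg_one_iff word.toList "ei".toList k hk).mp hnone
        simpa using this
      rw [hfe, hnone, show checkFindLoop word (fuel + 1) (-1) = true from by
        simp [checkFindLoop]]
      constructor
      · intro _ j hj hei
        exfalso
        apply hno
        have hp : ['e', 'i'] <+: (word.toList.drop k).drop (j - k) := by
          rw [List.drop_drop]
          have e : k + (j - k) = j := by omega
          rw [e]
          exact (eiAt_iff_prefix _ _).mp hei
        exact hp.isInfix.trans (List.drop_suffix _ _).isInfix
      · intro _
        rfl
    · -- first occurrence at i: check it, then continue from i + 2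
      set i := PySem.Chars.findFrom word.toList "ei".toList (k : Int) none with hi
      obtain ⟨hki, hpre, hmin⟩ :=
        PySem.Chars.findFrom_natCast_spec word.toList "ei".toList k hk hnone
      rw [← hi] at hki hpre hmin
      have hiAt : EiAt word.toList i.toNat := (eiAt_iff_prefix _ _).mpr hpre
      have hilt : i.toNat + 1 < word.toList.length :=
        (List.getElem?_eq_some_iff.mp hiAt.2).1
      have hi0 : 0 ≤ i := le_trans (by positivity) hki
      have hki' : k ≤ i.toNat := by omega
      have hmin' : ∀ m : Nat, k ≤ m → m < i.toNat → ¬ EiAt word.toList m := by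
        intro m hm1 hm2 hm
        exact hmin m hm1 hm2 ((eiAt_iff_prefix _ _).mp hm)
      have hstep : checkFindLoop word (fuel + 1) i =
          if (i == 0 || !(PySem.Str.pyGet? word (i - 1) == some 'c')) = true then false
          else checkFindLoop word fuel (PySem.Str.findFrom word "ei" (i + 2) none) := by
        simp only [checkFindLoop]
        rw [if_neg hnone]
      rw [hfe, hstep]
      by_cases hbad : i = 0 ∨ word.toList[i.toNat - 1]? ≠ some 'c'
      · -- this occurrence violates the rule: loop returns false, EiGood fails at i
        have hcond : (i == 0 || !(PySem.Str.pyGet? word (i - 1) == some 'c')) = true := by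
          by_cases h0 : i = 0
          · simp [h0]
          · have e : i - 1 = ((i.toNat - 1 : Nat) : Int) := by omega
            rw [e, PySem.Str.pyGet?_natCast]
            rcases hbad with h0' | hne
            · exact absurd h0' h0
            · simp [hne]
        rw [if_pos hcond]
        constructor
        · intro h
          exact absurd h (by simp)
        · intro hg
          exfalso
          obtain ⟨hpos, hc⟩ := hg i.toNat (by omega) hiAt
          rcases hbad with h0 | hne
          · omega
          · exact hne hc
      · -- occurrence is fine: A's rule holds at i; continue from i + 2
        push_neg at hbad
        obtain ⟨hne0, hc⟩ := hbad
        have hcond : (i == 0 || !(PySem.Str.pyGet? word (i - 1) == some 'c')) = false := by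
          have e : i - 1 = ((i.toNat - 1 : Nat) : Int) := by omega
          rw [e, PySem.Str.pyGet?_natCast]
          simp [hne0, hc]
        rw [if_neg (by rw [hcond]; simp)]
        have e2 : i + 2 = ((i.toNat + 2 : Nat) : Int) := by omega
        rw [e2, ih (i.toNat + 2) (by omega) (by omega)]
        constructor
        · intro hg j hj hej
          by_cases hjlt : j < i.toNat
          · exact absurd hej (hmin' j hj hjlt)
          · by_cases hji : j = i.toNat
            · exact hji ▸ ⟨by omega, hc⟩
            · by_cases hji1 : j = i.toNat + 1
              · exact absurd hej (hji1 ▸ ei_no_overlap _ _ hiAt)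
              · exact hg j (by omega) hej
        · intro hg j hj hej
          exact hg j (by omega) hej

lemma check_alt_char (word : String) :
    check_alt word = true ↔
      (¬ ['c', 'i', 'e'] <:+: word.toList) ∧ EiGood word.toList 0 := by
  unfold check_alt
  by_cases hin : PySem.Str.isIn "cie" word = true
  · have hcie : ['c', 'i', 'e'] <:+: word.toList := by
      simpa using (PySem.Str.isIn_iff_infix "cie" word).mp hin
    rw [if_pos hin]
    constructor
    · intro h
      exact absurd h (by simp)
    · rintro ⟨hno, -⟩
      exact (hno hcie).elim
  · have hno : ¬ ['c', 'i', 'e'] <:+: word.toList := by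
      intro h
      exact hin ((PySem.Str.isIn_iff_infix "cie" word).mpr (by simpa using h))
    rw [if_neg hin]
    have hfind : PySem.Str.find word "ei" = PySem.Str.findFrom word "ei" ((0 : Nat) : Int) none := by
      simp
    rw [hfind, loopB_char word _ 0 (by omega) (by simp [PySem.Str.len_eq])]
    simp [hno]

-- the bridge: "no hit anywhere in A" = "no cie substring and every ei preceded by c"
lemma cie_infix_iff (cs : List Char) :
    (['c', 'i', 'e'] <:+: cs) ↔
      ∃ m : Nat, cs[m]? = some 'c' ∧ cs[m+1]? = some 'i' ∧ cs[m+2]? = some 'e' := by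
  constructor
  · intro h
    obtain ⟨j, hp⟩ := (PySem.Chars.exists_prefix_drop_iff_isIn ['c', 'i', 'e'] cs).mpr
      ((PySem.Chars.isIn_iff_infix _ _).mpr h)
    refine ⟨j, ?_⟩
    have := prefix_triple.mp hp
    simpa [List.getElem?_drop] using this
  · rintro ⟨m, hc, hi, he⟩
    have hp : ['c', 'i', 'e'] <+: cs.drop m := by
      rw [prefix_triple]
      simp [List.getElem?_drop, hc, hi, he]
    exact hp.isInfix.trans (List.drop_suffix _ _).isInfix

lemma noHitA_iff (cs : List Char) :
    (∀ j, ¬ HitA cs j) ↔ (¬ ['c', 'i', 'e'] <:+: cs) ∧ EiGood cs 0 := by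
  constructor
  · intro h
    constructor
    · intro hin
      obtain ⟨m, hc, hi, he⟩ := (cie_infix_iff cs).mp hin
      exact h (m + 2) (Or.inl ⟨by omega, by simpa using he, by simpa using hi, by simpa using hc⟩)
    · intro j _ hej
      by_contra hbad
      push_neg at hbad
      refine h j (Or.inr ⟨hej.1, hej.2, ?_⟩)
      by_cases hj0 : j = 0
      · exact Or.inl hj0
      · exact Or.inr (hbad (by omega))
  · rintro ⟨hno, hg⟩ j hj
    rcases hj with ⟨h2, he, hi, hc⟩ | ⟨he, hi, hp⟩
    · refine hno ((cie_infix_iff cs).mpr ⟨j - 2, ?_, ?_, ?_⟩)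
      · exact hc
      · have e : j - 2 + 1 = j - 1 := by omega
        rw [e]; exact hi
      · have e : j - 2 + 2 = j := by omega
        rw [e]; exact he
    · obtain ⟨hpos, hc⟩ := hg j (by omega) ⟨he, hi⟩
      rcases hp with h0 | hne
      · omega
      · exact hne hc

-- ===== VERDICT (by name: the statement is the Claim_ definition above) =====
theorem check_spec : Claim_equal_check := by
  intro word _
  unfold Spec_check
  have hA := check_char word
  have hB := check_alt_char word
  have hiff : check word = true ↔ check_alt word = true := by
    rw [hA, hB, noHitA_iff]
  rcases hc : check word with _ | _ <;> rcases hca : check_alt word with _ | _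
  · rfl
  · exact absurd (hiff.mpr hca) (by simp [hc])
  · exact absurd (hiff.mp hc) (by simp [hca])
  · rfl
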